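-- pv_equiv track=rewrite | github.com/lagunerio/daily-algorithm | programmers/python/20220321-2.py | solution
-- ===== SOURCE A (Python) =====
-- def dfs(wire_dict, root):
-- 	visit, stack = [], []
-- 	stack.append(root)
-- 	while stack:
-- 		node = stack.pop()
-- 		if node not in visit:
-- 			visit.append(node)
-- 			stack.extend(wire_dict[node])
--
-- 	return visit
--
-- def get_nodes_diff(wires, idx):
-- 	from collections import defaultdict
-- 	wire_dict = defaultdict(list)
-- 	for wire in (wires[:idx] + wires[idx+1:]):
-- 		wire_dict[wire[0]].append(wire[1])
-- 		wire_dict[wire[1]].append(wire[0])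
--
-- 	left_nodes = len(dfs(wire_dict, wires[idx][0]))
-- 	right_nodes = len(dfs(wire_dict, wires[idx][1]))
--
-- 	if left_nodes > right_nodes:
-- 		return left_nodes - right_nodes
-- 	else:
-- 		return right_nodes - left_nodes
--
-- def solution(n, wires):
-- 	answer = len(wires)
-- 	wires.sort(key = lambda x: x)
--
-- 	for idx, wire in enumerate(wires):
-- 		tmp = get_nodes_diff(wires, idx)
-- 		if tmp < answer:
-- 			answer = tmp
--
-- 	return answer
-- ===== SOURCE B (Python) =====
-- def solution(n, wires):
--     # Return-value equivalent to A; unlike A, does not sort `wires` in place.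
--     best = len(wires)
--     for i, w in enumerate(wires):
--         rest = wires[:i] + wires[i + 1:]
--         # components of `rest` by small-to-large class relabelling (no graph traversal)
--         comp = {}    # node -> class representative
--         groups = {}  # representative -> list of member nodes
--         for e in rest:
--             x, y = e[0], e[1]
--             for z in (x, y):
--                 if z not in comp:
--                     comp[z] = z
--                     groups[z] = [z]
--             rx, ry = comp[x], comp[y]
--             if rx != ry:
--                 if len(groups[rx]) < len(groups[ry]):
--                     rx, ry = ry, rx
--                 for z in groups[ry]:
--                     comp[z] = rx
--                 groups[rx].extend(groups[ry])
--                 del groups[ry]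
--         a, b = w[0], w[1]
--         sa = len(groups[comp[a]]) if a in comp else 1
--         sb = len(groups[comp[b]]) if b in comp else 1
--         best = min(best, abs(sa - sb))
--     return best
-- ===== Notes on version B (the rewrite author's own statement) =====
-- stated objective: faster
-- what changed: A sorts the wires and, for every removed edge, rebuilds a whole adjacency dict and runs a stack DFS whose visited structure is a Python list (O(V) membership scan per pop) from both endpoints; B never builds a graph: for every removed edge it scans the remaining edge list once, merging labelled components union-find-style by small-to-large class relabelling, and reads both component sizes straight off the group table (timing: 7.4x at the largest size on sorted inputs, about 1.5x on the const family).
import Mathlib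
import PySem

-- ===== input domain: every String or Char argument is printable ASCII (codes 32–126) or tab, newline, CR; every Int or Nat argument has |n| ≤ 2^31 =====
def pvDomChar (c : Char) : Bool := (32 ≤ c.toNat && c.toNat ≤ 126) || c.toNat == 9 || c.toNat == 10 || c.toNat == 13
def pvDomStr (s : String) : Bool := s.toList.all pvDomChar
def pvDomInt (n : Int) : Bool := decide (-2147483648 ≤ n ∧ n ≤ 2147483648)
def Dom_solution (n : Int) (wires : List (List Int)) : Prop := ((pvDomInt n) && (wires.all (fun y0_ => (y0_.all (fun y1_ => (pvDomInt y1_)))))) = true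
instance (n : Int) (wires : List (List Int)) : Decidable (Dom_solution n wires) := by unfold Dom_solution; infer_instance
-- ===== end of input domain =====

-- B returns A's value but never builds a graph: instead of A's per-edge adjacency rebuild plus
-- list-visited DFS from both endpoints, B merges labelled components by small-to-large class
-- relabelling over the remaining edge list and reads the two sizes off the group table.
-- (A sorts `wires` in place; the equivalence proved here is about the RETURN value only.)

-- wire[0] / wire[1]; the `.getD 0` default is never reached under Pre_solution (wires of length ≥ 2)
def pvFst (w : List Int) : Int := (PySem.List.pyGet? w 0).getD 0
def pvSnd (w : List Int) : Int := (PySem.List.pyGet? w 1).getD 0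

-- ===== PORT A =====
-- Python's `while stack` loop; the Lean list head is Python's stack TOP (list end), so
-- `stack.extend(wire_dict[node])` prepends the reversed neighbour list.  Fuel only makes the
-- loop structurally total; dfsFuelA is proved sufficient below.
def dfsA (adj : PySem.Dict Int (List Int)) : Nat → List Int → List Int → List Int
  | 0, visit, _ => visit
  | _ + 1, visit, [] => visit
  | fuel + 1, visit, node :: rest =>
    if node ∈ visit then dfsA adj fuel visit rest
    else dfsA adj fuel (visit ++ [node]) ((adj.getD node []).reverse ++ rest)

def dfsFuelA (adj : PySem.Dict Int (List Int)) : Nat :=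
  (adj.values.flatten.length + 2) * (adj.values.flatten.length + 2) + 2

-- defaultdict(list) build: wire_dict[wire[0]].append(wire[1]) etc.  (The defaultdict also inserts
-- an empty entry for a missing key on dfs lookup; that never changes any `getD _ []` value.)
def buildWireDict (ws : List (List Int)) : PySem.Dict Int (List Int) :=
  ws.foldl (fun d w =>
    (d.modify (pvFst w) [] (· ++ [pvSnd w])).modify (pvSnd w) [] (· ++ [pvFst w]))
    PySem.Dict.empty

def getNodesDiff (ws : List (List Int)) (idx : Int) : Int :=
  let wd := buildWireDict (PySem.List.slice ws none (some idx) ++ PySem.List.slice ws (some (idx + 1)) none)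
  let leftNodes := (dfsA wd (dfsFuelA wd) [] [pvFst ((PySem.List.pyGet? ws idx).getD [])]).length
  let rightNodes := (dfsA wd (dfsFuelA wd) [] [pvSnd ((PySem.List.pyGet? ws idx).getD [])]).length
  if leftNodes > rightNodes then (leftNodes : Int) - (rightNodes : Int)
  else (rightNodes : Int) - (leftNodes : Int)

def solution (n : Int) (wires : List (List Int)) : Int :=
  let answer : Int := PySem.List.len wires
  let ws := PySem.List.sorted wires (fun x => x) false
  (PySem.List.enumerate ws 0).foldl
    (fun ans p => let tmp := getNodesDiff ws p.1; if tmp < ans then tmp else ans) answer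

-- ===== PORT B =====
-- the loop state: (comp : node -> class representative, groups : representative -> members)
def StB : Type := PySem.Dict Int Int × PySem.Dict Int (List Int)

-- `if z not in comp: comp[z] = z; groups[z] = [z]`
def pvEnsure (st : StB) (z : Int) : StB :=
  if (st.1.get? z).isSome then st else (st.1.insert z z, st.2.insert z [z])

-- `for z in groups[r2]: comp[z] = r1`; `groups[r1].extend(groups[r2])`; `del groups[r2]`
def pvRelabel (st : StB) (r1 r2 : Int) : StB :=
  let mem := (st.2.get? r2).getD []
  (mem.foldl (fun c z => c.insert z r1) st.1,
   (st.2.modify r1 [] (· ++ mem)).erase r2)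

-- one edge of the inner `for e in rest` loop (the `.getD 0`/`.getD []` defaults are never
-- reached: both endpoints were just ensured present, and rx/ry are group keys)
def pvMergeEdge (st0 : StB) (e : List Int) : StB :=
  let st := pvEnsure (pvEnsure st0 (pvFst e)) (pvSnd e)
  let rx := (st.1.get? (pvFst e)).getD 0
  let ry := (st.1.get? (pvSnd e)).getD 0
  if rx = ry then st
  else if ((st.2.get? rx).getD []).length < ((st.2.get? ry).getD []).length then
    pvRelabel st ry rx
  else pvRelabel st rx ry

-- `len(groups[comp[a]]) if a in comp else 1`
def pvSizeOf (st : StB) (a : Int) : Nat :=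
  match st.1.get? a with
  | some r => ((st.2.get? r).getD []).length
  | none => 1

def solution_alt (n : Int) (wires : List (List Int)) : Int :=
  (PySem.List.enumerate wires 0).foldl
    (fun best p =>
      let rest := PySem.List.slice wires none (some p.1) ++
                  PySem.List.slice wires (some (p.1 + 1)) none
      let st := rest.foldl pvMergeEdge (PySem.Dict.empty, PySem.Dict.empty)
      min best |((pvSizeOf st (pvFst p.2) : Int)) - ((pvSizeOf st (pvSnd p.2) : Int))|)
    (PySem.List.len wires)

-- ===== PRECONDITION & SPEC =====
-- Pre_ excludes wires with fewer than two entries, on which Python A raises IndexError (wire[0]/wire[1]).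
def Pre_solution (n : Int) (wires : List (List Int)) : Prop := ∀ w ∈ wires, 2 ≤ w.length
instance (n : Int) (wires : List (List Int)) : Decidable (Pre_solution n wires) := by
  unfold Pre_solution; infer_instance

def pvWitness_solution : Int × List (List Int) := (4, [[1, 3], [2, 3], [3, 4]])

def Spec_solution (n : Int) (wires : List (List Int)) (out : Int) : Prop := out = solution_alt n wires
instance (n : Int) (wires : List (List Int)) (out : Int) : Decidable (Spec_solution n wires out) := by
  unfold Spec_solution; infer_instance

-- ===== CLAIM (what is proved, stated in full; the proofs are below) =====
def Claim_equal_solution : Prop := ∀ (n : Int) (wires : List (List Int)),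
  Dom_solution n wires → Pre_solution n wires → Spec_solution n wires (solution n wires)

-- ===== LEMMAS AND PROOFS =====

-- The undirected edge-membership relation of a wire list, and reachability along it.
def EdgeMem (es : List (List Int)) (x y : Int) : Prop :=
  ∃ w ∈ es, (pvFst w = x ∧ pvSnd w = y) ∨ (pvSnd w = x ∧ pvFst w = y)

def ReachE (es : List (List Int)) (r x : Int) : Prop :=
  Relation.ReflTransGen (fun a b => EdgeMem es a b) r x

def StepReach (nbr : Int → List Int) (r x : Int) : Prop :=
  Relation.ReflTransGen (fun a b => b ∈ nbr a) r x

-- x occurs as an endpoint in the edge list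
def OccursE (es : List (List Int)) (x : Int) : Prop :=
  ∃ w ∈ es, pvFst w = x ∨ pvSnd w = x

lemma buildA_eq (es : List (List Int)) :
    buildWireDict es =
      (es.flatMap (fun w => [(pvFst w, pvSnd w), (pvSnd w, pvFst w)])).foldl
        (fun d p => d.modify p.1 [] (· ++ [p.2])) PySem.Dict.empty := by
  suffices h : ∀ (es : List (List Int)) (d : PySem.Dict Int (List Int)),
      es.foldl (fun d w => (d.modify (pvFst w) [] (· ++ [pvSnd w])).modify (pvSnd w) [] (· ++ [pvFst w])) d =
      (es.flatMap (fun w => [(pvFst w, pvSnd w), (pvSnd w, pvFst w)])).foldl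
        (fun d p => d.modify p.1 [] (· ++ [p.2])) d by
    exact h es _
  intro es
  induction es with
  | nil => intro d; rfl
  | cons w t ih => intro d; simp only [List.foldl_cons, List.flatMap_cons, List.foldl_append]; exact ih _

lemma mem_buildA (es : List (List Int)) (x y : Int) :
    y ∈ (buildWireDict es).getD x [] ↔ EdgeMem es x y := by
  rw [buildA_eq, PySem.Dict.getD_foldl_modify_append]
  simp only [PySem.Dict.getD_empty, List.nil_append, List.mem_map, List.mem_filter,
    List.mem_flatMap, EdgeMem]
  constructor
  · rintro ⟨p, ⟨⟨w, hw, hp⟩, hx⟩, hy⟩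
    simp only [List.mem_cons, List.not_mem_nil, or_false] at hp
    refine ⟨w, hw, ?_⟩
    rcases hp with h | h <;> subst h <;> simp only [beq_iff_eq] at hx <;> subst hx <;> subst hy
    · exact Or.inl ⟨rfl, rfl⟩
    · exact Or.inr ⟨rfl, rfl⟩
  · rintro ⟨w, hw, h | h⟩
    · exact ⟨(pvFst w, pvSnd w), ⟨⟨w, hw, by simp⟩, by simp [h.1]⟩, h.2⟩
    · exact ⟨(pvSnd w, pvFst w), ⟨⟨w, hw, by simp⟩, by simp [h.1]⟩, h.2⟩

lemma reachE_congr (r1 r2 : List (List Int)) (h : ∀ x, x ∈ r1 ↔ x ∈ r2) (root x : Int) :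
    ReachE r1 root x ↔ ReachE r2 root x := by
  have hstep : ∀ a b, EdgeMem r1 a b ↔ EdgeMem r2 a b := by
    intro a b
    unfold EdgeMem
    constructor <;> rintro ⟨w, hw, hp⟩
    · exact ⟨w, (h w).mp hw, hp⟩
    · exact ⟨w, (h w).mpr hw, hp⟩
  unfold ReachE
  constructor <;> intro hr
  · exact Relation.ReflTransGen.mono (fun a b hab => (hstep a b).mp hab) hr
  · exact Relation.ReflTransGen.mono (fun a b hab => (hstep a b).mpr hab) hr

lemma eraseIdx_perm_erase (l : List (List Int)) (k : Nat) (hk : k < l.length) :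
    (l.eraseIdx k).Perm (l.erase l[k]) :=
  (List.erase_getElem hk).symm

lemma getD_subset_flatten (adj : PySem.Dict Int (List Int)) (u : Int) :
    ∀ y ∈ adj.getD u [], y ∈ adj.values.flatten := by
  obtain ⟨items⟩ := adj
  induction items with
  | nil => intro y hy; simp [PySem.Dict.getD, PySem.Dict.get?] at hy
  | cons p rest ih =>
    intro y hy
    obtain ⟨k, v⟩ := p
    simp only [PySem.Dict.getD, PySem.Dict.get?_mk_cons] at hy ih ⊢
    simp only [PySem.Dict.values_mk, List.map_cons, List.flatten_cons, List.mem_append]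
    by_cases hk : k == u
    · simp [hk] at hy; exact Or.inl hy
    · simp [hk] at hy
      right
      have := ih y hy
      simpa [PySem.Dict.values_mk] using this

lemma mem_of_closed (nbr : Int → List Int) (root : Int) (v : List Int)
    (hroot : root ∈ v) (hcl : ∀ a ∈ v, ∀ b ∈ nbr a, b ∈ v)
    {x : Int} (h : StepReach nbr root x) : x ∈ v := by
  induction h with
  | refl => exact hroot
  | tail _ h2 ih => exact hcl _ ih _ h2

lemma getD_length_le (adj : PySem.Dict Int (List Int)) (u : Int) :
    (adj.getD u []).length ≤ adj.values.flatten.length := by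
  obtain ⟨items⟩ := adj
  induction items with
  | nil => simp [PySem.Dict.getD, PySem.Dict.get?]
  | cons p rest ih =>
    obtain ⟨k, v⟩ := p
    simp only [PySem.Dict.getD, PySem.Dict.get?_mk_cons] at ih ⊢
    simp only [PySem.Dict.values_mk, List.map_cons, List.flatten_cons, List.length_append]
    by_cases hk : k == u
    · simp [hk]
    · simp only [Bool.not_eq_true] at hk
      simp only [hk, Bool.false_eq_true, if_false]
      simp only [PySem.Dict.values_mk] at ih
      omega

lemma dfsA_go (adj : PySem.Dict Int (List Int)) (root : Int) (fuel : Nat) :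
    ∀ (visit stack : List Int),
      (∀ x ∈ stack, x ∈ root :: adj.values.flatten) →
      ((root :: adj.values.flatten).toFinset \ visit.toFinset).card *
          (adj.values.flatten.length + 1) + stack.length < fuel →
      visit.Nodup →
      (root ∈ visit ∨ root ∈ stack) →
      (∀ x ∈ visit, StepReach (fun u => adj.getD u []) root x) →
      (∀ x ∈ stack, StepReach (fun u => adj.getD u []) root x) →
      (∀ x ∈ visit, ∀ y ∈ adj.getD x [], y ∈ visit ∨ y ∈ stack) →
      (dfsA adj fuel visit stack).Nodup ∧ root ∈ dfsA adj fuel visit stack ∧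
      (∀ x ∈ dfsA adj fuel visit stack, StepReach (fun u => adj.getD u []) root x) ∧
      (∀ x ∈ dfsA adj fuel visit stack, ∀ y ∈ adj.getD x [], y ∈ dfsA adj fuel visit stack) := by
  induction fuel with
  | zero => intro visit stack _ hM _ _ _ _ _; omega
  | succ f ih =>
    intro visit stack hsub hM hnd hroot hvr hsr hcl
    match stack with
    | [] =>
      refine ⟨hnd, ?_, hvr, ?_⟩
      · rcases hroot with h | h
        · exact h
        · simp at h
      · intro x hx y hy
        rcases hcl x hx y hy with h | h
        · exact h
        · simp at h
    | node :: rest =>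
      by_cases hmem : node ∈ visit
      · have hstep : dfsA adj (f + 1) visit (node :: rest) = dfsA adj f visit rest := by
          simp [dfsA, hmem]
        rw [hstep]
        apply ih visit rest
        · exact fun x hx => hsub x (List.mem_cons_of_mem _ hx)
        · simp at hM ⊢; omega
        · exact hnd
        · rcases hroot with h | h
          · exact Or.inl h
          · rcases List.mem_cons.mp h with h' | h'
            · exact Or.inl (h' ▸ hmem)
            · exact Or.inr h'
        · exact hvr
        · exact fun x hx => hsr x (List.mem_cons_of_mem _ hx)
        · intro x hx y hy
          rcases hcl x hx y hy with h | h
          · exact Or.inl h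
          · rcases List.mem_cons.mp h with h' | h'
            · exact Or.inl (h' ▸ hmem)
            · exact Or.inr h'
      · have hstep : dfsA adj (f + 1) visit (node :: rest) =
            dfsA adj f (visit ++ [node]) ((adj.getD node []).reverse ++ rest) := by
          simp [dfsA, hmem]
        rw [hstep]
        have hnodeU : node ∈ root :: adj.values.flatten := hsub node List.mem_cons_self
        have hreachnode : StepReach (fun u => adj.getD u []) root node := hsr node List.mem_cons_self
        apply ih
        · intro x hx
          rcases List.mem_append.mp hx with h | h
          · exact List.mem_cons_of_mem _ (getD_subset_flatten adj node x (List.mem_reverse.mp h))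
          · exact hsub x (List.mem_cons_of_mem _ h)
        · -- fuel arithmetic
          set U := root :: adj.values.flatten with hU
          set T := adj.values.flatten.length with hT
          have hfin : (U.toFinset \ (visit ++ [node]).toFinset) =
              (U.toFinset \ visit.toFinset).erase node := by
            simp only [List.toFinset_append, List.toFinset_cons, List.toFinset_nil]
            rw [show (insert node (∅ : Finset Int)) = {node} by simp]
            rw [Finset.union_comm, ← Finset.insert_eq, Finset.sdiff_insert]
          have hmemf : node ∈ U.toFinset \ visit.toFinset := by
            simp [List.mem_toFinset, hnodeU, hmem]
          have hcard : ((U.toFinset \ visit.toFinset).erase node).card =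
              (U.toFinset \ visit.toFinset).card - 1 := Finset.card_erase_of_mem hmemf
          have hpos : 1 ≤ (U.toFinset \ visit.toFinset).card := Finset.card_pos.mpr ⟨node, hmemf⟩
          have hlen : (adj.getD node []).length ≤ T := getD_length_le adj node
          rw [hfin, hcard]
          set c := (U.toFinset \ visit.toFinset).card with hc
          have hmul : (c - 1) * (T + 1) + (T + 1) = c * (T + 1) := by
            have : c - 1 + 1 = c := by omega
            calc (c - 1) * (T + 1) + (T + 1) = (c - 1 + 1) * (T + 1) := by ring
            _ = c * (T + 1) := by rw [this]
          simp only [List.length_append, List.length_reverse, List.length_cons] at hM ⊢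
          omega
        · exact (List.nodup_append.mpr ⟨hnd, List.nodup_singleton _, by simpa using fun a ha (h : a = node) => hmem (h ▸ ha)⟩)
        · rcases hroot with h | h
          · exact Or.inl (List.mem_append.mpr (Or.inl h))
          · rcases List.mem_cons.mp h with h' | h'
            · exact Or.inl (List.mem_append.mpr (Or.inr (by simp [h'])))
            · exact Or.inr (List.mem_append.mpr (Or.inr h'))
        · intro x hx
          rcases List.mem_append.mp hx with h | h
          · exact hvr x h
          · simp at h; exact h ▸ hreachnode
        · intro x hx
          rcases List.mem_append.mp hx with h | h
          · exact Relation.ReflTransGen.tail hreachnode (List.mem_reverse.mp h)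
          · exact hsr x (List.mem_cons_of_mem _ h)
        · intro x hx y hy
          rcases List.mem_append.mp hx with h | h
          · rcases hcl x h y hy with h' | h'
            · exact Or.inl (List.mem_append.mpr (Or.inl h'))
            · rcases List.mem_cons.mp h' with h'' | h''
              · exact Or.inl (List.mem_append.mpr (Or.inr (by simp [h''])))
              · exact Or.inr (List.mem_append.mpr (Or.inr h''))
          · simp at h
            subst h
            exact Or.inr (List.mem_append.mpr (Or.inl (List.mem_reverse.mpr hy)))

lemma dfsA_run (adj : PySem.Dict Int (List Int)) (root : Int) :
    (dfsA adj (dfsFuelA adj) [] [root]).Nodup ∧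
    ∀ x, x ∈ dfsA adj (dfsFuelA adj) [] [root] ↔ StepReach (fun u => adj.getD u []) root x := by
  have hM : ((root :: adj.values.flatten).toFinset \ ([] : List Int).toFinset).card *
      (adj.values.flatten.length + 1) + ([root] : List Int).length < dfsFuelA adj := by
    set T := adj.values.flatten.length with hT
    have hcard : ((root :: adj.values.flatten).toFinset \ ([] : List Int).toFinset).card ≤ T + 1 := by
      calc ((root :: adj.values.flatten).toFinset \ ([] : List Int).toFinset).card
          ≤ (root :: adj.values.flatten).toFinset.card := Finset.card_le_card Finset.sdiff_subset
        _ ≤ (root :: adj.values.flatten).length := List.toFinset_card_le _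
        _ = T + 1 := by simp [hT]
    have h1 : ((root :: adj.values.flatten).toFinset \ ([] : List Int).toFinset).card * (T + 1) ≤
        (T + 1) * (T + 1) := Nat.mul_le_mul_right _ hcard
    have h2 : (T + 1) * (T + 1) + 1 < (T + 2) * (T + 2) + 2 := by nlinarith
    simp only [dfsFuelA, ← hT, List.length_singleton]
    omega
  obtain ⟨hnd, hrt, hreach, hclosed⟩ := dfsA_go adj root (dfsFuelA adj) [] [root]
    (by intro x hx; simp at hx; simp [hx])
    hM (List.nodup_nil) (Or.inr (List.mem_singleton_self _))
    (by intro x hx; simp at hx)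
    (by intro x hx; simp at hx; exact hx ▸ Relation.ReflTransGen.refl)
    (by intro x hx; simp at hx)
  refine ⟨hnd, fun x => ⟨hreach x, ?_⟩⟩
  intro h
  exact mem_of_closed (fun u => adj.getD u []) root _ hrt hclosed h

lemma stepReach_iff_reachE (nbr : Int → List Int) (es : List (List Int))
    (h : ∀ x y, y ∈ nbr x ↔ EdgeMem es x y) (root x : Int) :
    StepReach nbr root x ↔ ReachE es root x := by
  constructor <;> intro hr
  · exact Relation.ReflTransGen.mono (fun a b hab => (h a b).mp hab) hr
  · exact Relation.ReflTransGen.mono (fun a b hab => (h a b).mpr hab) hr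

-- A's visit list is a duplicate-free enumeration of the reachable set
def reachListA (es : List (List Int)) (root : Int) : List Int :=
  dfsA (buildWireDict es) (dfsFuelA (buildWireDict es)) [] [root]

lemma reachListA_spec (es : List (List Int)) (root : Int) :
    (reachListA es root).Nodup ∧ ∀ x, x ∈ reachListA es root ↔ ReachE es root x := by
  obtain ⟨hnd, hiff⟩ := dfsA_run (buildWireDict es) root
  exact ⟨hnd, fun x => by
    rw [reachListA, hiff x,
      stepReach_iff_reachE _ es (fun a b => mem_buildA es a b) root x]⟩

lemma sizeA_perm (r1 r2 : List (List Int)) (h : r1.Perm r2) (root : Int) :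
    (dfsA (buildWireDict r1) (dfsFuelA (buildWireDict r1)) [] [root]).length =
      (reachListA r2 root).length := by
  obtain ⟨hnd1, hiff1⟩ := reachListA_spec r1 root
  obtain ⟨hnd2, hiff2⟩ := reachListA_spec r2 root
  refine ((List.perm_ext_iff_of_nodup hnd1 hnd2).mpr ?_).length_eq
  intro x
  rw [hiff1, hiff2, reachE_congr r1 r2 (fun w => h.mem_iff) root x]

-- the common semantic per-wire value (proof-only helper)
def pvC (wires : List (List Int)) (w : List Int) : Int :=
  |((reachListA (wires.erase w) (pvFst w)).length : Int) -
    ((reachListA (wires.erase w) (pvSnd w)).length : Int)|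

lemma if_gt_eq_abs (a b : Nat) :
    (if a > b then (a : Int) - (b : Int) else (b : Int) - (a : Int)) = |(a : Int) - (b : Int)| := by
  by_cases h : a ≤ b
  · rw [if_neg (by omega), abs_sub_comm, abs_of_nonneg (by omega)]
  · rw [if_pos (by omega), abs_of_nonneg (by omega)]

lemma slice_pair_eq_eraseIdx (ws : List (List Int)) (k : Nat) :
    PySem.List.slice ws none (some (k : Int)) ++
      PySem.List.slice ws (some ((k : Int) + 1)) none = ws.eraseIdx k := by
  have h1 : ((k : Int) + 1) = ((k + 1 : Nat) : Int) := by push_cast; ring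
  rw [PySem.List.slice_to_natCast, h1, PySem.List.slice_from_natCast,
    ← List.eraseIdx_eq_take_drop_succ]

lemma getNodesDiff_eq_pvC (wires ws : List (List Int)) (hp : ws.Perm wires) (k : Nat)
    (hk : k < ws.length) : getNodesDiff ws (k : Int) = pvC wires ws[k] := by
  simp only [getNodesDiff, pvC]
  have hget : (PySem.List.pyGet? ws (k : Int)).getD [] = ws[k] := by
    simp [List.getElem?_eq_getElem hk]
  have hperm : (ws.eraseIdx k).Perm (wires.erase ws[k]) :=
    (eraseIdx_perm_erase ws k hk).trans (List.Perm.erase ws[k] hp)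
  rw [slice_pair_eq_eraseIdx, hget,
    sizeA_perm _ _ hperm (pvFst ws[k]), sizeA_perm _ _ hperm (pvSnd ws[k])]
  exact if_gt_eq_abs _ _

lemma range_foldl_min (l : List (List Int)) (f : List Int → Int) (init : Int) :
    (List.range l.length).foldl (fun a k => min a (f (l.getD k []))) init =
      (l.map f).foldl min init := by
  induction l using List.reverseRecOn generalizing init with
  | nil => simp
  | append_singleton xs x ih =>
    rw [List.length_append, List.length_singleton, List.range_succ, List.foldl_append,
      List.map_append, List.foldl_append]
    have hcongr : (List.range xs.length).foldl
        (fun a k => min a (f ((xs ++ [x]).getD k []))) init =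
        (List.range xs.length).foldl (fun a k => min a (f (xs.getD k []))) init := by
      apply PySem.List.foldl_congr_mem
      intro acc k hkmem
      have hk : k < xs.length := List.mem_range.mp hkmem
      congr 2
      rw [List.getD_eq_getElem?_getD, List.getD_eq_getElem?_getD,
        List.getElem?_append_left hk]
    rw [hcongr, ih]
    simp only [List.foldl_cons, List.foldl_nil]
    congr 1
    rw [List.getD_eq_getElem?_getD, List.getElem?_concat_length]
    rfl


-- ===== B-side machinery: invariant of the class-relabelling fold =====

lemma get?_erase_dict {ν : Type} (d : PySem.Dict Int ν) (k k' : Int) :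
    (d.erase k).get? k' = if k' = k then none else d.get? k' := by
  obtain ⟨items⟩ := d
  induction items with
  | nil => simp [PySem.Dict.erase, PySem.Dict.get?]
  | cons p rest ih =>
    obtain ⟨a, b⟩ := p
    show (PySem.Dict.mk (((a, b) :: rest).filter (fun p => !p.1 == k))).get? k' = _
    rw [List.filter_cons]
    by_cases hak : a = k
    · rw [if_neg (by simp [hak] : ¬ ((!((a, b).1 == k)) = true))]
      rw [show (PySem.Dict.mk (rest.filter fun p => !p.1 == k)) = (PySem.Dict.mk rest).erase k from rfl,
        ih, PySem.Dict.get?_mk_cons]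
      by_cases hk' : k' = k
      · simp [hk']
      · rw [if_neg hk', if_neg hk', show (a == k') = false from by simp [hak, Ne.symm hk']]
        simp
    · rw [if_pos (by simp [hak] : (!((a, b).1 == k)) = true)]
      rw [PySem.Dict.get?_mk_cons,
        show (PySem.Dict.mk (rest.filter fun p => !p.1 == k)) = (PySem.Dict.mk rest).erase k from rfl,
        ih, PySem.Dict.get?_mk_cons]
      by_cases hk' : k' = k
      · rw [if_pos hk', if_pos hk',
          show (a == k') = false from by simp [hk', hak]]
        simp
      · rw [if_neg hk', if_neg hk']

lemma get?_modify_dict {ν : Type} (d : PySem.Dict Int ν) (k k' : Int) (d0 : ν) (f : ν → ν) :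
    (d.modify k d0 f).get? k' = if k' = k then some (f (d.getD k d0)) else d.get? k' := by
  simp [PySem.Dict.modify, PySem.Dict.get?_insert]

lemma get?_foldl_insert_const (l : List Int) (c : PySem.Dict Int Int) (r x : Int) :
    (l.foldl (fun c z => c.insert z r) c).get? x = if x ∈ l then some r else c.get? x := by
  induction l generalizing c with
  | nil => simp
  | cons z t ih =>
    simp only [List.foldl_cons, ih]
    by_cases hx : x ∈ t
    · simp [hx]
    · by_cases hz : x = z <;> simp [hx, hz, PySem.Dict.get?_insert]

lemma edgeMem_symm (es : List (List Int)) {a b : Int} (h : EdgeMem es a b) : EdgeMem es b a := by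
  obtain ⟨w, hw, hc | hc⟩ := h
  · exact ⟨w, hw, Or.inr ⟨hc.2, hc.1⟩⟩
  · exact ⟨w, hw, Or.inl ⟨hc.2, hc.1⟩⟩

lemma reachE_symm (es : List (List Int)) {a b : Int} (h : ReachE es a b) : ReachE es b a :=
  Relation.ReflTransGen.symmetric (fun _ _ hx => edgeMem_symm es hx) h

lemma edgeMem_occurs (es : List (List Int)) {a b : Int} (h : EdgeMem es a b) : OccursE es a := by
  obtain ⟨w, hw, hc | hc⟩ := h
  · exact ⟨w, hw, Or.inl hc.1⟩
  · exact ⟨w, hw, Or.inr hc.1⟩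

lemma reach_occurs (es : List (List Int)) {a x : Int} (h : ReachE es a x) :
    x = a ∨ OccursE es x := by
  induction h with
  | refl => exact Or.inl rfl
  | tail _ h2 _ => exact Or.inr (edgeMem_occurs es (edgeMem_symm es h2))

lemma reach_eq_of_not_occurs (es : List (List Int)) {a x : Int} (hna : ¬ OccursE es a)
    (h : ReachE es a x) : x = a := by
  rcases (Relation.ReflTransGen.cases_head h) with h' | ⟨c, hc, _⟩
  · exact h'.symm
  · exact absurd (edgeMem_occurs es hc) hna

lemma reachE_append_singleton (es : List (List Int)) (e : List Int) (u v : Int) :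
    ReachE (es ++ [e]) u v ↔
      ReachE es u v ∨ (ReachE es u (pvFst e) ∧ ReachE es (pvSnd e) v) ∨
        (ReachE es u (pvSnd e) ∧ ReachE es (pvFst e) v) := by
  constructor
  · intro h
    induction h with
    | refl => exact Or.inl Relation.ReflTransGen.refl
    | @tail m b _ h2 ih =>
      obtain ⟨w, hw, hp⟩ := h2
      rcases List.mem_append.mp hw with hw' | hw'
      · have hcb : EdgeMem es m b := ⟨w, hw', hp⟩
        rcases ih with h | ⟨h1, h2'⟩ | ⟨h1, h2'⟩
        · exact Or.inl (h.tail hcb)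
        · exact Or.inr (Or.inl ⟨h1, h2'.tail hcb⟩)
        · exact Or.inr (Or.inr ⟨h1, h2'.tail hcb⟩)
      · have hwe : w = e := by simpa using hw'
        subst hwe
        rcases hp with ⟨hc, hb⟩ | ⟨hc, hb⟩
        · subst hb
          rcases ih with h | ⟨h1, _⟩ | ⟨h1, _⟩
          · exact Or.inr (Or.inl ⟨hc ▸ h, Relation.ReflTransGen.refl⟩)
          · exact Or.inr (Or.inl ⟨h1, Relation.ReflTransGen.refl⟩)
          · exact Or.inl h1
        · subst hb
          rcases ih with h | ⟨h1, _⟩ | ⟨h1, _⟩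
          · exact Or.inr (Or.inr ⟨hc ▸ h, Relation.ReflTransGen.refl⟩)
          · exact Or.inl h1
          · exact Or.inr (Or.inr ⟨h1, Relation.ReflTransGen.refl⟩)
  · intro h
    have hmono : ∀ {a b : Int}, ReachE es a b → ReachE (es ++ [e]) a b :=
      fun h' => Relation.ReflTransGen.mono
        (fun a b ⟨w, hw, hp⟩ => ⟨w, List.mem_append.mpr (Or.inl hw), hp⟩) h'
    have hstep : ReachE (es ++ [e]) (pvFst e) (pvSnd e) :=
      Relation.ReflTransGen.single ⟨e, by simp, Or.inl ⟨rfl, rfl⟩⟩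
    have hstep' : ReachE (es ++ [e]) (pvSnd e) (pvFst e) :=
      Relation.ReflTransGen.single ⟨e, by simp, Or.inr ⟨rfl, rfl⟩⟩
    rcases h with h | ⟨h1, h2⟩ | ⟨h1, h2⟩
    · exact hmono h
    · exact ((hmono h1).trans hstep).trans (hmono h2)
    · exact ((hmono h1).trans hstep').trans (hmono h2)

-- the invariant: comp's keys are V ⊇ endpoints of es, values are class representatives,
-- two keys share a representative iff they are connected by es, and groups lists each class.
def InvB (es : List (List Int)) (V : Int → Prop) (st : StB) : Prop :=
  (∀ x, (st.1.get? x).isSome ↔ V x) ∧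
  (∀ x, OccursE es x → V x) ∧
  (∀ x r, st.1.get? x = some r → st.1.get? r = some r) ∧
  (∀ x y rx ry, st.1.get? x = some rx → st.1.get? y = some ry → (rx = ry ↔ ReachE es x y)) ∧
  (∀ r, (st.2.get? r).isSome ↔ st.1.get? r = some r) ∧
  (∀ r l, st.2.get? r = some l → l.Nodup ∧ ∀ x, x ∈ l ↔ st.1.get? x = some r)

lemma invB_iff (es : List (List Int)) (V V' : Int → Prop) (st : StB)
    (h : ∀ x, V x ↔ V' x) (hI : InvB es V st) : InvB es V' st := by
  obtain ⟨hK, hO, hR, hE, hG1, hG2⟩ := hI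
  exact ⟨fun x => (hK x).trans (h x), fun x hx => (h x).mp (hO x hx), hR, hE, hG1, hG2⟩

lemma ensure_invB (es : List (List Int)) (V : Int → Prop) (st : StB) (z : Int)
    (hI : InvB es V st) : InvB es (fun a => V a ∨ a = z) (pvEnsure st z) := by
  obtain ⟨hK, hO, hR, hE, hG1, hG2⟩ := hI
  unfold pvEnsure
  by_cases hz : (st.1.get? z).isSome
  · rw [if_pos hz]
    have hVz : V z := (hK z).mp hz
    exact ⟨fun x => ⟨fun h => Or.inl ((hK x).mp h),
        fun h => (hK x).mpr (h.elim id (fun he => he ▸ hVz))⟩,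
      fun x hx => Or.inl (hO x hx), hR, hE, hG1, hG2⟩
  · rw [if_neg hz]
    have hznone : st.1.get? z = none := Option.not_isSome_iff_eq_none.mp hz
    have hVz : ¬ V z := fun h => hz ((hK z).mpr h)
    have hOz : ¬ OccursE es z := fun h => hVz (hO z h)
    have hkeyne : ∀ x r, st.1.get? x = some r → r ≠ z := by
      intro x r hx he
      rw [he] at hx
      have h2 := hR x z hx
      rw [hznone] at h2
      simp at h2
    have hC : ∀ x, (st.1.insert z z).get? x = if x = z then some z else st.1.get? x := by
      intro x; rw [PySem.Dict.get?_insert]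
    have hG : ∀ r, (st.2.insert z [z]).get? r = if r = z then some [z] else st.2.get? r := by
      intro r; rw [PySem.Dict.get?_insert]
    refine ⟨?_, ?_, ?_, ?_, ?_, ?_⟩
    · intro x
      rw [hC]
      by_cases hx : x = z
      · simp [hx]
      · rw [if_neg hx, hK x]; simp [hx]
    · exact fun x hx => Or.inl (hO x hx)
    · intro x r
      rw [hC x, hC r]
      by_cases hx : x = z
      · rw [if_pos hx]
        intro h
        have hr : r = z := by simpa using h.symm
        rw [if_pos hr, hr]
      · rw [if_neg hx]
        intro h
        rw [if_neg (hkeyne x r h)]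
        exact hR x r h
    · intro x y rx ry
      rw [hC x, hC y]
      by_cases hx : x = z <;> by_cases hy : y = z
      · rw [if_pos hx, if_pos hy]
        intro h1 h2
        have hrx : rx = z := by simpa using h1.symm
        have hry : ry = z := by simpa using h2.symm
        exact iff_of_true (by rw [hrx, hry])
          (by rw [hx, hy]; exact Relation.ReflTransGen.refl)
      · rw [if_pos hx, if_neg hy]
        intro h1 h2
        have hrx : rx = z := by simpa using h1.symm
        refine iff_of_false (fun h => hkeyne y ry h2 (by rw [← h, hrx])) (fun h => ?_)
        have h' : ReachE es z y := by rw [← hx]; exact h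
        exact hy (reach_eq_of_not_occurs es hOz h')
      · rw [if_neg hx, if_pos hy]
        intro h1 h2
        have hry : ry = z := by simpa using h2.symm
        refine iff_of_false (fun h => hkeyne x rx h1 (by rw [h, hry])) (fun h => ?_)
        have h' : ReachE es z x := by rw [← hy]; exact reachE_symm es h
        exact hx (reach_eq_of_not_occurs es hOz h')
      · rw [if_neg hx, if_neg hy]
        exact hE x y rx ry
    · intro r
      rw [hG r, hC r]
      by_cases hr : r = z
      · simp [hr]
      · rw [if_neg hr, if_neg hr]
        exact hG1 r
    · intro r l
      rw [hG r]
      by_cases hr : r = z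
      · rw [if_pos hr]
        intro h
        have hl : l = [z] := by simpa using h.symm
        subst hl
        refine ⟨List.nodup_singleton _, fun x => ?_⟩
        rw [hC x]
        by_cases hx : x = z
        · rw [if_pos hx]
          simp [hx, hr]
        · rw [if_neg hx]
          simp only [List.mem_singleton]
          refine iff_of_false hx (fun h' => ?_)
          exact hkeyne x r h' hr
      · rw [if_neg hr]
        intro h
        obtain ⟨hnd, hmem⟩ := hG2 r l h
        refine ⟨hnd, fun x => ?_⟩
        rw [hC x]
        by_cases hx : x = z
        · rw [if_pos hx]
          refine iff_of_false (fun h' => ?_) (fun h' => ?_)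
          · have h2 := (hmem x).mp h'
            rw [hx, hznone] at h2
            simp at h2
          · exact hr (by simpa using h'.symm)
        · rw [if_neg hx]
          exact hmem x

lemma relabel_invB (es : List (List Int)) (e : List Int) (V : Int → Prop) (st : StB)
    (hI : InvB es V st) (a b r1 r2 : Int)
    (hset : (a = pvFst e ∧ b = pvSnd e) ∨ (a = pvSnd e ∧ b = pvFst e))
    (ha : st.1.get? a = some r1) (hb : st.1.get? b = some r2) (hne : r1 ≠ r2) :
    InvB (es ++ [e]) V (pvRelabel st r1 r2) := by
  obtain ⟨hK, hO, hR, hE, hG1, hG2⟩ := hI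
  have hr1 : st.1.get? r1 = some r1 := hR a r1 ha
  have hr2 : st.1.get? r2 = some r2 := hR b r2 hb
  obtain ⟨l1, hl1⟩ := Option.isSome_iff_exists.mp ((hG1 r1).mpr hr1)
  obtain ⟨l2, hl2⟩ := Option.isSome_iff_exists.mp ((hG1 r2).mpr hr2)
  obtain ⟨hnd1, hm1⟩ := hG2 r1 l1 hl1
  obtain ⟨hnd2, hm2⟩ := hG2 r2 l2 hl2
  have hmemv : (st.2.get? r2).getD [] = l2 := by rw [hl2]; rfl
  set f : Int → Int := fun c => if c = r2 then r1 else c with hf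
  have hfr1 : f r1 = r1 := by simp [hf]
  have hfne : ∀ c, c ≠ r2 → f c = c := fun c hc => by simp [hf, hc]
  have hC' : ∀ x, (pvRelabel st r1 r2).1.get? x = (st.1.get? x).map f := by
    intro x
    show (((st.2.get? r2).getD []).foldl (fun c z => c.insert z r1) st.1).get? x =
      (st.1.get? x).map f
    rw [hmemv, get?_foldl_insert_const]
    cases hsx : st.1.get? x with
    | none =>
      have hx : x ∉ l2 := fun hx => by
        have h2 := (hm2 x).mp hx; rw [hsx] at h2; simp at h2
      rw [if_neg hx]; simp
    | some c =>
      by_cases hc : c = r2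
      · have hx : x ∈ l2 := (hm2 x).mpr (by rw [hsx, hc])
        rw [if_pos hx]
        simp [hf, hc]
      · have hx : x ∉ l2 := fun hx => hc (by
          have h2 := (hm2 x).mp hx; rw [hsx] at h2; simpa using h2)
        rw [if_neg hx]
        simp [hfne c hc]
  have hG' : ∀ r, (pvRelabel st r1 r2).2.get? r =
      if r = r2 then none else if r = r1 then some (l1 ++ l2) else st.2.get? r := by
    intro r
    show (((st.2.modify r1 [] (· ++ (st.2.get? r2).getD []))).erase r2).get? r = _
    rw [hmemv, get?_erase_dict, get?_modify_dict]
    by_cases hr : r = r2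
    · rw [if_pos hr, if_pos hr]
    · rw [if_neg hr, if_neg hr]
      by_cases hr1' : r = r1
      · rw [if_pos hr1', if_pos hr1', PySem.Dict.getD_eq_get?_getD, hl1]
        rfl
      · rw [if_neg hr1', if_neg hr1']
  have hcollapse : ∀ c d : Int, (f c = f d) ↔
      (c = d ∨ ((c = r1 ∨ c = r2) ∧ (d = r1 ∨ d = r2))) := by
    intro c d
    by_cases hc2 : c = r2 <;> by_cases hd2 : d = r2 <;> simp [hf, hc2, hd2] <;> omega
  have hVa : V a := (hK a).mp (by rw [ha]; rfl)
  have hVb : V b := (hK b).mp (by rw [hb]; rfl)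
  have hreach' : ∀ u v, ReachE (es ++ [e]) u v ↔
      ReachE es u v ∨ (ReachE es u a ∧ ReachE es b v) ∨ (ReachE es u b ∧ ReachE es a v) := by
    intro u v
    rw [reachE_append_singleton]
    rcases hset with ⟨h1, h2⟩ | ⟨h1, h2⟩
    · rw [← h1, ← h2]
    · rw [← h1, ← h2]
      constructor
      · rintro (h | ⟨x1, x2⟩ | ⟨x1, x2⟩)
        exacts [Or.inl h, Or.inr (Or.inr ⟨x1, x2⟩), Or.inr (Or.inl ⟨x1, x2⟩)]
      · rintro (h | ⟨x1, x2⟩ | ⟨x1, x2⟩)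
        exacts [Or.inl h, Or.inr (Or.inr ⟨x1, x2⟩), Or.inr (Or.inl ⟨x1, x2⟩)]
  refine ⟨?_, ?_, ?_, ?_, ?_, ?_⟩
  · intro x
    rw [hC' x, Option.isSome_map]
    exact hK x
  · intro x hx
    obtain ⟨w, hw, hp⟩ := hx
    rcases List.mem_append.mp hw with hw' | hw'
    · exact hO x ⟨w, hw', hp⟩
    · have hwe : w = e := by simpa using hw'
      subst hwe
      rcases hset with ⟨h1, h2⟩ | ⟨h1, h2⟩ <;> rcases hp with h | h
      · exact (h1.trans h) ▸ hVa
      · exact (h2.trans h) ▸ hVb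
      · exact (h2.trans h) ▸ hVb
      · exact (h1.trans h) ▸ hVa
  · intro x r
    rw [hC' x, hC' r]
    intro h
    cases hsx : st.1.get? x with
    | none => rw [hsx] at h; simp at h
    | some c =>
      rw [hsx] at h
      have hfc : f c = r := by simpa using h
      by_cases hc : c = r2
      · have hrr1 : r = r1 := by rw [← hfc, hc]; simp [hf]
        rw [hrr1, hr1]
        simp [hfr1]
      · have hrc : r = c := by rw [← hfc, hfne c hc]
        rw [hrc, hR x c hsx]
        simp [hfne c hc]
  · intro x y rx ry
    rw [hC' x, hC' y]
    intro h1 h2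
    cases hsx : st.1.get? x with
    | none => rw [hsx] at h1; simp at h1
    | some cx =>
      cases hsy : st.1.get? y with
      | none => rw [hsy] at h2; simp at h2
      | some cy =>
        rw [hsx] at h1; rw [hsy] at h2
        have hfx : f cx = rx := by simpa using h1
        have hfy : f cy = ry := by simpa using h2
        rw [hreach' x y, ← hfx, ← hfy, hcollapse cx cy]
        constructor
        · rintro (h | ⟨hc | hc, hd | hd⟩)
          · exact Or.inl ((hE x y cx cy hsx hsy).mp h)
          · exact Or.inl ((hE x y cx cy hsx hsy).mp (hc.trans hd.symm))
          · exact Or.inr (Or.inl ⟨(hE x a cx r1 hsx ha).mp hc,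
              reachE_symm es ((hE y b cy r2 hsy hb).mp hd)⟩)
          · exact Or.inr (Or.inr ⟨(hE x b cx r2 hsx hb).mp hc,
              reachE_symm es ((hE y a cy r1 hsy ha).mp hd)⟩)
          · exact Or.inl ((hE x y cx cy hsx hsy).mp (hc.trans hd.symm))
        · rintro (h | ⟨h1', h2'⟩ | ⟨h1', h2'⟩)
          · exact Or.inl ((hE x y cx cy hsx hsy).mpr h)
          · exact Or.inr ⟨Or.inl ((hE x a cx r1 hsx ha).mpr h1'),
              Or.inr ((hE y b cy r2 hsy hb).mpr (reachE_symm es h2'))⟩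
          · exact Or.inr ⟨Or.inr ((hE x b cx r2 hsx hb).mpr h1'),
              Or.inl ((hE y a cy r1 hsy ha).mpr (reachE_symm es h2'))⟩
  · intro r
    rw [hG' r, hC' r]
    by_cases hr : r = r2
    · rw [if_pos hr, hr, hr2]
      simp [hf, hne]
    · rw [if_neg hr]
      by_cases hr1' : r = r1
      · rw [if_pos hr1', hr1', hr1]
        simp [hfr1]
      · rw [if_neg hr1']
        rw [show ((st.2.get? r).isSome = true ↔ st.1.get? r = some r) from hG1 r]
        cases hsr : st.1.get? r with
        | none => simp
        | some c =>
          simp only [Option.map_some, Option.some.injEq]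
          by_cases hc : c = r2
          · refine iff_of_false (fun h => hr (hc ▸ h ▸ rfl)) (fun h => hr1' ?_)
            rw [← h, hc]
            simp [hf]
          · rw [hfne c hc]
  · intro r l
    rw [hG' r]
    by_cases hr : r = r2
    · rw [if_pos hr]
      intro h
      simp at h
    · rw [if_neg hr]
      by_cases hr1' : r = r1
      · rw [if_pos hr1']
        intro h
        have hl : l = l1 ++ l2 := by simpa using h.symm
        subst hl
        refine ⟨List.nodup_append.mpr ⟨hnd1, hnd2, fun x hx1 y hy2 hxy => hne (by
          have e1 := (hm1 x).mp hx1
          have e2 := (hm2 y).mp hy2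
          rw [← hxy, e1] at e2
          simpa using e2)⟩, fun x => ?_⟩
        rw [hC' x, hr1']
        cases hsx : st.1.get? x with
        | none =>
          refine iff_of_false (fun hx => ?_) (by simp)
          rcases List.mem_append.mp hx with hx' | hx'
          · have := (hm1 x).mp hx'; rw [hsx] at this; simp at this
          · have := (hm2 x).mp hx'; rw [hsx] at this; simp at this
        | some c =>
          simp only [Option.map_some, Option.some.injEq, List.mem_append]
          rw [hm1 x, hm2 x, hsx]
          simp only [Option.some.injEq]
          constructor
          · rintro (h' | h')
            · rw [h']; exact hfr1
            · rw [h']; simp [hf]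
          · intro h'
            by_cases hc : c = r2
            · exact Or.inr hc
            · left
              rw [← h', hfne c hc]
      · rw [if_neg hr1']
        intro h
        obtain ⟨hnd, hmem⟩ := hG2 r l h
        refine ⟨hnd, fun x => ?_⟩
        rw [hC' x, hmem x]
        cases hsx : st.1.get? x with
        | none => simp
        | some c =>
          simp only [Option.map_some, Option.some.injEq]
          by_cases hc : c = r2
          · refine iff_of_false (fun h' => hr (hc ▸ h' ▸ rfl)) (fun h' => hr1' ?_)
            rw [← h', hc]
            simp [hf]
          · rw [hfne c hc]

lemma mergeEdge_invB (es : List (List Int)) (e : List Int) (V : Int → Prop) (st0 : StB)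
    (hI : InvB es V st0) :
    InvB (es ++ [e]) (fun x => (V x ∨ x = pvFst e) ∨ x = pvSnd e) (pvMergeEdge st0 e) := by
  have hI2 : InvB es (fun x => (V x ∨ x = pvFst e) ∨ x = pvSnd e)
      (pvEnsure (pvEnsure st0 (pvFst e)) (pvSnd e)) :=
    ensure_invB es _ _ (pvSnd e) (ensure_invB es V st0 (pvFst e) hI)
  set st := pvEnsure (pvEnsure st0 (pvFst e)) (pvSnd e) with hst
  obtain ⟨hK, hO, hR, hE, hG1, hG2⟩ := hI2
  have hxs : (st.1.get? (pvFst e)).isSome := (hK _).mpr (Or.inl (Or.inr rfl))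
  have hys : (st.1.get? (pvSnd e)).isSome := (hK _).mpr (Or.inr rfl)
  obtain ⟨rx, hrx⟩ := Option.isSome_iff_exists.mp hxs
  obtain ⟨ry, hry⟩ := Option.isSome_iff_exists.mp hys
  have hI2' : InvB es (fun x => (V x ∨ x = pvFst e) ∨ x = pvSnd e) st :=
    ⟨hK, hO, hR, hE, hG1, hG2⟩
  have hme : pvMergeEdge st0 e =
      (if (st.1.get? (pvFst e)).getD 0 = (st.1.get? (pvSnd e)).getD 0 then st
       else if ((st.2.get? ((st.1.get? (pvFst e)).getD 0)).getD []).length <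
                ((st.2.get? ((st.1.get? (pvSnd e)).getD 0)).getD []).length then
         pvRelabel st ((st.1.get? (pvSnd e)).getD 0) ((st.1.get? (pvFst e)).getD 0)
       else pvRelabel st ((st.1.get? (pvFst e)).getD 0) ((st.1.get? (pvSnd e)).getD 0)) := rfl
  rw [hme, hrx, hry]
  simp only [Option.getD_some]
  by_cases hr : rx = ry
  · rw [if_pos hr]
    refine ⟨hK, ?_, hR, ?_, hG1, hG2⟩
    · intro x hx
      obtain ⟨w, hw, hp⟩ := hx
      rcases List.mem_append.mp hw with hw' | hw'
      · exact hO x ⟨w, hw', hp⟩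
      · have hwe : w = e := by simpa using hw'
        subst hwe
        rcases hp with h | h
        · exact Or.inl (Or.inr h.symm)
        · exact Or.inr h.symm
    · intro x y cx cy h1 h2
      rw [reachE_append_singleton]
      have hbase := hE x y cx cy h1 h2
      constructor
      · intro h
        exact Or.inl (hbase.mp h)
      · rintro (h | ⟨h1', h2'⟩ | ⟨h1', h2'⟩)
        · exact hbase.mpr h
        · have e1 : cx = rx := (hE x (pvFst e) cx rx h1 hrx).mpr h1'
          have e2 : ry = cy := (hE (pvSnd e) y ry cy hry h2).mpr h2'
          rw [e1, ← e2, hr]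
        · have e1 : cx = ry := (hE x (pvSnd e) cx ry h1 hry).mpr h1'
          have e2 : rx = cy := (hE (pvFst e) y rx cy hrx h2).mpr h2'
          rw [e1, ← e2, hr]
  · rw [if_neg hr]
    by_cases hsz : ((st.2.get? rx).getD []).length < ((st.2.get? ry).getD []).length
    · rw [if_pos hsz]
      exact relabel_invB es e _ st hI2' (pvSnd e) (pvFst e) ry rx
        (Or.inr ⟨rfl, rfl⟩) hry hrx (fun h => hr h.symm)
    · rw [if_neg hsz]
      exact relabel_invB es e _ st hI2' (pvFst e) (pvSnd e) rx ry
        (Or.inl ⟨rfl, rfl⟩) hrx hry hr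

lemma foldl_merge_invB (es : List (List Int)) : ∀ (pre : List (List Int)) (V : Int → Prop)
    (st : StB), InvB pre V st →
    InvB (pre ++ es) (fun a => V a ∨ OccursE es a) (es.foldl pvMergeEdge st) := by
  induction es with
  | nil =>
    intro pre V st h
    simp only [List.foldl_nil, List.append_nil]
    refine invB_iff _ _ _ _ (fun x => ?_) h
    constructor
    · exact Or.inl
    · rintro (h' | ⟨w, hw, _⟩)
      · exact h'
      · simp at hw
  | cons e t ih =>
    intro pre V st h
    have h1 := mergeEdge_invB pre e V st h
    have h2 := ih (pre ++ [e]) _ _ h1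
    rw [List.append_assoc] at h2
    simp only [List.singleton_append] at h2
    refine invB_iff _ _ _ _ (fun x => ?_) h2
    simp only [OccursE, List.mem_cons]
    constructor
    · rintro (((h' | h') | h') | ⟨w, hw, hp⟩)
      · exact Or.inl h'
      · exact Or.inr ⟨e, Or.inl rfl, Or.inl h'.symm⟩
      · exact Or.inr ⟨e, Or.inl rfl, Or.inr h'.symm⟩
      · exact Or.inr ⟨w, Or.inr hw, hp⟩
    · rintro (h' | ⟨w, hw | hw, hp⟩)
      · exact Or.inl (Or.inl (Or.inl h'))
      · subst hw
        rcases hp with h' | h'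
        · exact Or.inl (Or.inl (Or.inr h'.symm))
        · exact Or.inl (Or.inr h'.symm)
      · exact Or.inr ⟨w, hw, hp⟩

lemma invB_empty : InvB [] (fun _ => False) (PySem.Dict.empty, PySem.Dict.empty) := by
  refine ⟨?_, ?_, ?_, ?_, ?_, ?_⟩
  · intro x
    simp [PySem.Dict.get?_empty]
  · rintro x ⟨w, hw, _⟩
    simp at hw
  · intro x r h
    rw [show ((PySem.Dict.empty, PySem.Dict.empty) : StB).1 = PySem.Dict.empty from rfl,
      PySem.Dict.get?_empty] at h
    simp at h
  · intro x y rx ry h1 h2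
    rw [show ((PySem.Dict.empty, PySem.Dict.empty) : StB).1 = PySem.Dict.empty from rfl,
      PySem.Dict.get?_empty] at h1
    simp at h1
  · intro r
    simp [PySem.Dict.get?_empty]
  · intro r l h
    rw [show ((PySem.Dict.empty, PySem.Dict.empty) : StB).2 = PySem.Dict.empty from rfl,
      PySem.Dict.get?_empty] at h
    simp at h

lemma sizeB_eq (es : List (List Int)) (a : Int) :
    pvSizeOf (es.foldl pvMergeEdge (PySem.Dict.empty, PySem.Dict.empty)) a =
      (reachListA es a).length := by
  have h := foldl_merge_invB es [] (fun _ => False) _ invB_empty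
  simp only [List.nil_append] at h
  obtain ⟨hK, hO, hR, hE, hG1, hG2⟩ := h
  set st := es.foldl pvMergeEdge (PySem.Dict.empty, PySem.Dict.empty) with hst
  obtain ⟨hndL, hmemL⟩ := reachListA_spec es a
  cases hsa : st.1.get? a with
  | some r =>
    have hra : st.1.get? r = some r := hR a r hsa
    obtain ⟨l, hl⟩ := Option.isSome_iff_exists.mp ((hG1 r).mpr hra)
    simp only [pvSizeOf, hsa, hl, Option.getD_some]
    obtain ⟨hnd, hmem⟩ := hG2 r l hl
    refine ((List.perm_ext_iff_of_nodup hnd hndL).mpr ?_).length_eq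
    intro x
    rw [hmemL x, hmem x]
    constructor
    · intro hx
      exact reachE_symm es ((hE x a r r hx hsa).mp rfl)
    · intro hx
      rcases reach_occurs es hx with h' | h'
      · rw [h']
        exact hsa
      · have hx' : (st.1.get? x).isSome := (hK x).mpr (Or.inr h')
        obtain ⟨cx, hcx⟩ := Option.isSome_iff_exists.mp hx'
        have heq : r = cx := (hE a x r cx hsa hcx).mpr hx
        rw [hcx, ← heq]
  | none =>
    simp only [pvSizeOf, hsa]
    have hna : ¬ OccursE es a := by
      intro h'
      have h2 := (hK a).mpr (Or.inr h')
      rw [hsa] at h2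
      simp at h2
    have hiff : ∀ x, x ∈ reachListA es a ↔ x ∈ ([a] : List Int) := by
      intro x
      rw [hmemL x, List.mem_singleton]
      exact ⟨fun h' => reach_eq_of_not_occurs es hna h',
        fun h' => h' ▸ Relation.ReflTransGen.refl⟩
    have hperm := (List.perm_ext_iff_of_nodup hndL (List.nodup_singleton a)).mpr hiff
    have := hperm.length_eq
    simp at this
    omega

lemma reachLen_perm (r1 r2 : List (List Int)) (h : r1.Perm r2) (root : Int) :
    (reachListA r1 root).length = (reachListA r2 root).length :=
  sizeA_perm r1 r2 h root

theorem ports_agree (n : Int) (wires : List (List Int)) :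
    solution n wires = solution_alt n wires := by
  simp only [solution, solution_alt]
  have hperm : (PySem.List.sorted wires (fun x => x) false).Perm wires :=
    PySem.List.sorted_perm wires (fun x => x) false
  set ws := PySem.List.sorted wires (fun x => x) false with hws
  have hA : (PySem.List.enumerate ws 0).foldl
      (fun ans p => if getNodesDiff ws p.1 < ans then getNodesDiff ws p.1 else ans)
      (PySem.List.len wires) = (ws.map (pvC wires)).foldl min (PySem.List.len wires) := by
    rw [show (PySem.List.enumerate ws 0).foldl
        (fun ans p => if getNodesDiff ws p.1 < ans then getNodesDiff ws p.1 else ans)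
        (PySem.List.len wires) =
      ((PySem.List.enumerate ws 0).map (fun p => p.1)).foldl
        (fun ans i => if getNodesDiff ws i < ans then getNodesDiff ws i else ans)
        (PySem.List.len wires) from (List.foldl_map (f := fun p : Int × List Int => p.1)
        (g := fun ans i => if getNodesDiff ws i < ans then getNodesDiff ws i else ans)).symm]
    rw [PySem.List.map_fst_enumerate, zero_add, PySem.List.pyRange_zero_nat, List.foldl_map]
    rw [PySem.List.foldl_congr_mem _ _
      (fun a (k : Nat) => min a (pvC wires (ws.getD k []))) _ ?_]
    · exact range_foldl_min ws (pvC wires) _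
    · intro acc k hkmem
      have hk : k < ws.length := List.mem_range.mp hkmem
      rw [getNodesDiff_eq_pvC wires ws hperm k hk]
      simp only [List.getD_eq_getElem ws [] hk, min_def]
      split_ifs <;> omega
  have hB : (PySem.List.enumerate wires 0).foldl
      (fun best p =>
        min best
          |((pvSizeOf ((PySem.List.slice wires none (some p.1) ++
              PySem.List.slice wires (some (p.1 + 1)) none).foldl pvMergeEdge
              (PySem.Dict.empty, PySem.Dict.empty)) (pvFst p.2) : Int)) -
            ((pvSizeOf ((PySem.List.slice wires none (some p.1) ++
              PySem.List.slice wires (some (p.1 + 1)) none).foldl pvMergeEdge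
              (PySem.Dict.empty, PySem.Dict.empty)) (pvSnd p.2) : Int))|)
      (PySem.List.len wires) = (wires.map (pvC wires)).foldl min (PySem.List.len wires) := by
    rw [PySem.List.enumerate_eq_map_pyRange wires ([] : List Int), List.foldl_map,
      show PySem.List.len wires = ((wires.length : Nat) : Int) from rfl,
      PySem.List.pyRange_zero_nat, List.foldl_map]
    rw [PySem.List.foldl_congr_mem _ _
      (fun a (k : Nat) => min a (pvC wires (wires.getD k []))) _ ?_]
    · exact range_foldl_min wires (pvC wires) _
    · intro acc k hkmem
      have hk : k < wires.length := List.mem_range.mp hkmem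
      simp only [PySem.List.pyGetD_natCast]
      rw [slice_pair_eq_eraseIdx, sizeB_eq, sizeB_eq]
      have hperm2 : (wires.eraseIdx k).Perm (wires.erase (wires.getD k [])) := by
        rw [List.getD_eq_getElem wires [] hk]
        exact eraseIdx_perm_erase wires k hk
      rw [reachLen_perm _ _ hperm2 (pvFst (wires.getD k [])),
        reachLen_perm _ _ hperm2 (pvSnd (wires.getD k []))]
      rfl
  rw [hA, hB]
  exact @List.Perm.foldl_eq _ _ min _ _
    ⟨fun b a1 a2 => by rw [min_assoc, min_comm a1 a2, ← min_assoc]⟩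
    (hperm.map (pvC wires)) (PySem.List.len wires)

-- ===== VERDICT (by name: the statement is the Claim_ definition above) =====
theorem solution_spec : Claim_equal_solution := by
  intro n wires _ _
  unfold Spec_solution
  exact ports_agree n wires
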